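-- pv_equiv track=rewrite | github.com/yaeba/binary-search-solutions | solutions/Rotate-a-Box-Under-Gravity.py | solve
-- ===== SOURCE A (Python) =====
-- def solve(matrix):
--     OBSTACLE = "*"
--     BOX = "#"
--     SPACE = "."
--
--     # for every row, process the rowstring so that
--     # BOXes are right aligned to OBSTACLEs
--     for r in range(len(matrix)):
--         row = [
--             (BOX * substr.count(BOX)).rjust(len(substr), SPACE)
--             for substr in "".join(matrix[r]).split(OBSTACLE)
--         ]
--         matrix[r] = list(OBSTACLE.join(row))
--
--     # rotate and return
--     return list(zip(*matrix[::-1]))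
-- ===== SOURCE B (Python) =====
-- def solve(matrix):
--     # Gravity by a right-to-left two-pointer sweep per row (mutates matrix
--     # rows into lists of chars like the original), then rotate with zip.
--     for r in range(len(matrix)):
--         row = "".join(matrix[r])
--         n = len(row)
--         out = ["."] * n
--         last = n - 1
--         for j in range(n - 1, -1, -1):
--             c = row[j]
--             if c == "*":
--                 out[j] = "*"
--                 last = j - 1
--             elif c == "#":
--                 out[last] = "#"
--                 last -= 1
--         matrix[r] = out
--     return list(zip(*matrix[::-1]))
-- ===== Notes on version B (the rewrite author's own statement) =====
-- stated objective: alternative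
-- what changed: The per-row gravity pass no longer splits the row on obstacles and rebuilds each piece with count/rjust; instead one right-to-left sweep with a write pointer places every box directly against the next obstacle to its right, writing into a pre-filled row of dots; the zip-based rotation is kept.
import Mathlib
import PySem

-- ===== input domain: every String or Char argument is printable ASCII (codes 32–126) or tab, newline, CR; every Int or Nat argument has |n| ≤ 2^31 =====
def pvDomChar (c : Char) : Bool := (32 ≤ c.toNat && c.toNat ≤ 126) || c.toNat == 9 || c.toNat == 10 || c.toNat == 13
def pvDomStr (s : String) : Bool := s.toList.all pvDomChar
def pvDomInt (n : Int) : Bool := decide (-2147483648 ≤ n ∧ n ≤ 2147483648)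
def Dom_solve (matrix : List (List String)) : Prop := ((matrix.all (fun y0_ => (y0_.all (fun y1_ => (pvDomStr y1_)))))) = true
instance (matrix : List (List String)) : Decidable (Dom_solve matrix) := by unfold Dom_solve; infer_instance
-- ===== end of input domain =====

-- B replaces A's split/rjust gravity pass by a single right-to-left two-pointer sweep
-- per row (objective: alternative, same cost).  Both Pythons mutate `matrix` rows into
-- per-cell lists in place; the equivalence proved here is about the RETURN value only.

-- ===== PORT A =====
-- shared rotate helper: `list(zip(*rows))` — truncates to the shortest row, [] for no rows
def pyZip (rows : List (List String)) : List (List String) :=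
  match rows with
  | [] => []
  | r0 :: rest =>
    if (r0 :: rest).any (fun r => r.isEmpty) then []
    else ((r0 :: rest).map (fun r => r.headD "")) :: pyZip ((r0 :: rest).map List.tail)
termination_by (rows.headD []).length
decreasing_by
  simp_all [List.isEmpty_iff]
  cases r0 with
  | nil => simp_all
  | cons x xs => simp

-- s.rjust(w, fill): exact — unchanged if w ≤ len(s), else left-padded with fill
def pyRjust (s : List Char) (w : Nat) (fill : Char) : List Char :=
  if w ≤ s.length then s else List.replicate (w - s.length) fill ++ s

-- the comprehension body: "*"-split, box count, rjust, "*"-join (on the row's chars)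
def gravA (cs : List Char) : List Char :=
  PySem.Chars.join ['*'] ((PySem.Chars.splitOn cs ['*']).map
    (fun substr => pyRjust (List.replicate (PySem.Chars.count substr ['#']) '#') substr.length '.'))

-- matrix[r] = list(OBSTACLE.join(row)) — a list of one-character strings
def rowA (r : List String) : List String :=
  (gravA (PySem.Chars.join [] (r.map String.toList))).map (fun c => String.ofList [c])

def solve (matrix : List (List String)) : List (List String) :=
  pyZip ((matrix.map rowA).reverse)

-- ===== PORT B =====
-- the two-pointer sweep: j runs last-index .. 0 (argument = number of cells left),
-- `last` is the write pointer for the next box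
def bLoop (row : List Char) : Nat → List Char → Nat → List Char
  | 0, out, _ => out
  | j+1, out, last =>
    let c := row.getD j ' '
    if c = '*' then bLoop row j (out.set j '*') (j-1)
    else if c = '#' then bLoop row j (out.set last '#') (last-1)
    else bLoop row j out last

def rowB (r : List String) : List String :=
  let row := PySem.Chars.join [] (r.map String.toList)
  (bLoop row row.length (List.replicate row.length '.') (row.length - 1)).map
    (fun c => String.ofList [c])

def solve_alt (matrix : List (List String)) : List (List String) :=
  pyZip ((matrix.map rowB).reverse)

-- ===== PRECONDITION & SPEC =====
def Spec_solve (matrix : List (List String)) (out : List (List String)) : Prop := out = solve_alt matrix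
instance (matrix : List (List String)) (out : List (List String)) : Decidable (Spec_solve matrix out) := by unfold Spec_solve; infer_instance

-- ===== CLAIM (what is proved, stated in full; the proofs are below) =====
def Claim_equal_solve : Prop := ∀ (matrix : List (List String)), Dom_solve matrix → Spec_solve matrix (solve matrix)

-- ===== LEMMAS AND PROOFS =====

-- single-character split, accumulator style: what splitOn.go computes for sep = "*"
def splitStar : List Char → List Char → List (List Char)
  | [], cur => [cur.reverse]
  | c :: rest, cur => if c = '*' then cur.reverse :: splitStar rest [] else splitStar rest (c :: cur)

-- the first "*"-free segment of a row
def FS (s : List Char) : List Char := s.takeWhile (fun c => c != '*')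

-- right-aligned boxes of one segment
def rjS (seg : List Char) : List Char :=
  List.replicate (seg.length - seg.count '#') '.' ++ List.replicate (seg.count '#') '#'

-- gravity of a whole row, segment-wise (the common reference point of both ports)
def J (s : List Char) : List Char := PySem.Chars.join ['*'] ((splitStar s []).map rjS)

theorem go_split (l : List Char) : ∀ (fuel : Nat) (cur : List Char) (acc : List (List Char)),
    l.length ≤ fuel → PySem.Chars.splitOn.go ['*'] fuel l cur acc = acc.reverse ++ splitStar l cur := by
  induction l with
  | nil =>
    intro fuel cur acc _
    cases fuel <;> simp [PySem.Chars.splitOn.go, splitStar]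
  | cons c rest ih =>
    intro fuel cur acc h
    cases fuel with
    | zero => simp at h
    | succ f =>
      simp only [List.length_cons, Nat.add_le_add_iff_right] at h
      by_cases hc : c = '*'
      · subst hc
        rw [PySem.Chars.splitOn.go]
        simp only [List.isPrefixOf, BEq.rfl, Bool.true_and,
          List.length_cons, List.length_nil, List.drop_succ_cons, List.drop_zero]
        rw [ih f [] ((cur.reverse) :: acc) h]
        simp [splitStar]
      · rw [PySem.Chars.splitOn.go]
        have hp : (['*'].isPrefixOf (c :: rest)) = false := by
          simp [List.isPrefixOf, Ne.symm hc]
        rw [hp]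
        simp only [Bool.false_eq_true, if_false]
        rw [ih f (c :: cur) acc h]
        simp [splitStar, hc]

theorem splitOn_star (l : List Char) : PySem.Chars.splitOn l ['*'] = splitStar l [] := by
  simp [PySem.Chars.splitOn, go_split l (l.length + 1) [] [] (by omega)]

theorem go_count (l : List Char) : ∀ (fuel : Nat) (acc : Nat),
    l.length ≤ fuel → PySem.Chars.count.go ['#'] fuel l acc = acc + l.count '#' := by
  induction l with
  | nil => intro fuel acc _; cases fuel <;> simp [PySem.Chars.count.go]
  | cons c rest ih =>
    intro fuel acc h
    cases fuel with
    | zero => simp at h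
    | succ f =>
      simp only [List.length_cons, Nat.add_le_add_iff_right] at h
      by_cases hc : c = '#'
      · subst hc
        rw [PySem.Chars.count.go]
        simp only [List.isPrefixOf, BEq.rfl, Bool.true_and,
          List.length_cons, List.length_nil, List.drop_succ_cons, List.drop_zero]
        rw [ih f (acc+1) h]
        simp
        omega
      · rw [PySem.Chars.count.go]
        have hp : (['#'].isPrefixOf (c :: rest)) = false := by
          simp [List.isPrefixOf, Ne.symm hc]
        rw [hp]
        simp only [Bool.false_eq_true, if_false]
        rw [ih f acc h]
        simp [hc]

theorem count_hash (l : List Char) : PySem.Chars.count l ['#'] = l.count '#' := by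
  simp [PySem.Chars.count, go_count l l.length 0 (by omega)]

theorem rjust_repl (k n : Nat) :
    pyRjust (List.replicate k '#') n '.' = List.replicate (n - k) '.' ++ List.replicate k '#' := by
  unfold pyRjust
  split_ifs with h
  · simp at h
    have : n - k = 0 := by omega
    simp [this]
  · simp

theorem gravA_eq_J (cs : List Char) : gravA cs = J cs := by
  unfold gravA J
  rw [splitOn_star]
  congr 1
  apply List.map_congr_left
  intro substr _
  rw [count_hash, rjust_repl]
  simp [rjS]

-- FS step equations
theorem FS_star (s : List Char) : FS ('*' :: s) = [] := by simp [FS]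
theorem FS_cons (c : Char) (s : List Char) (hc : c ≠ '*') : FS (c :: s) = c :: FS s := by
  simp [FS, hc]

theorem splitStar_acc (s : List Char) : ∀ cur, splitStar s cur =
    (cur.reverse ++ FS s) :: (splitStar s []).tail := by
  induction s with
  | nil => intro cur; simp [splitStar, FS]
  | cons c rest ih =>
    intro cur
    by_cases hc : c = '*'
    · subst hc; simp [splitStar, FS]
    · simp only [splitStar, if_neg hc]
      rw [ih (c :: cur), ih [c], FS_cons c rest hc]
      simp

theorem splitStar_shape (s : List Char) : splitStar s [] = FS s :: (splitStar s []).tail := by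
  conv_lhs => rw [splitStar_acc s []]
  simp

theorem join_cons (sep a : List Char) (t : List (List Char)) :
    PySem.Chars.join sep (a :: t) = a ++ (if t = [] then [] else sep ++ PySem.Chars.join sep t) := by
  cases t with
  | nil => simp [PySem.Chars.join, List.intercalate]
  | cons b u => simp [PySem.Chars.join, List.intercalate, List.intersperse]

theorem count_le_len (seg : List Char) : seg.count '#' ≤ seg.length := List.count_le_length

-- writing one cell: set inside a dot block, and set past a prefix
theorem set_repl (m : Nat) (X : List Char) (y : Char) :
    (List.replicate (m+1) '.' ++ X).set m y = List.replicate m '.' ++ y :: X := by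
  induction m with
  | zero => simp
  | succ n ih => simpa [List.replicate_succ, List.set] using ih

theorem set_shift (j : Nat) (T : List Char) (i : Nat) (y : Char) :
    (List.replicate j '.' ++ T).set (j + i) y = List.replicate j '.' ++ T.set i y := by
  induction j with
  | zero => simp
  | succ n ih => simpa [List.replicate_succ, List.set, Nat.succ_add] using ih

-- the four defining equations of J
theorem J_nil : J [] = [] := by decide

theorem J_star (s : List Char) : J ('*' :: s) = '*' :: J s := by
  rw [J, show splitStar ('*'::s) [] = [] :: splitStar s [] from by simp [splitStar],
    List.map_cons, join_cons, J]
  have hne : (splitStar s []).map rjS ≠ [] := by rw [splitStar_shape s]; simp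
  simp [hne, rjS]

theorem J_dot (c : Char) (s : List Char) (hc : c ≠ '*') (hc2 : c ≠ '#') :
    J (c :: s) = '.' :: J s := by
  have hcons : splitStar (c :: s) [] = (c :: FS s) :: (splitStar s []).tail := by
    simp only [splitStar, if_neg hc]
    rw [splitStar_acc s [c]]
    simp
  rw [J, hcons, List.map_cons, join_cons, J]
  conv_rhs => rw [splitStar_shape s]
  rw [List.map_cons, join_cons]
  have hk := count_le_len (FS s)
  have hrj : rjS (c :: FS s) = '.' :: rjS (FS s) := by
    have hb : (c == '#') = false := by simp [hc2]
    simp only [rjS, List.count_cons, List.length_cons, hb, if_false, Nat.add_zero,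
      Bool.false_eq_true]
    rw [show (FS s).length + 1 - (FS s).count '#' = ((FS s).length - (FS s).count '#') + 1 by omega,
      List.replicate_succ]
    simp
  rw [hrj]
  simp

theorem J_box (s : List Char) :
    J ('#' :: s) = ('.' :: J s).set ((FS s).length - (FS s).count '#') '#' := by
  have hcons : splitStar ('#' :: s) [] = ('#' :: FS s) :: (splitStar s []).tail := by
    simp only [splitStar, if_neg (by decide : ('#':Char) ≠ '*')]
    rw [splitStar_acc s ['#']]
    simp
  rw [J, hcons, List.map_cons, join_cons, J]
  conv_rhs => rw [splitStar_shape s]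
  rw [List.map_cons, join_cons]
  have hk := count_le_len (FS s)
  generalize (if List.map rjS ((splitStar s []).tail) = [] then ([] : List Char)
      else ['*'] ++ PySem.Chars.join ['*'] (List.map rjS ((splitStar s []).tail))) = R
  have hL : rjS ('#' :: FS s) =
      List.replicate ((FS s).length - (FS s).count '#') '.' ++
        List.replicate ((FS s).count '#' + 1) '#' := by
    simp only [rjS, List.count_cons, List.length_cons, BEq.rfl, if_true]
    rw [show (FS s).length + 1 - ((FS s).count '#' + 1) = (FS s).length - (FS s).count '#' by omega]
  have hRHS : ('.' :: (rjS (FS s) ++ R)) =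
      List.replicate (((FS s).length - (FS s).count '#') + 1) '.' ++
        (List.replicate ((FS s).count '#') '#' ++ R) := by
    simp [rjS, List.replicate_succ]
  rw [hL, hRHS, set_repl]
  simp [List.replicate_succ]

-- loop invariant of the two-pointer sweep: after the suffix cs.drop j has been
-- processed, out is j dots followed by the gravity of that suffix, and last + 1
-- points one past the dot block of its first segment
theorem bLoop_inv (cs : List Char) : ∀ (j : Nat) (out : List Char) (last : Nat),
    j ≤ cs.length →
    out = List.replicate j '.' ++ J (cs.drop j) →
    (1 ≤ j → last + 1 = j + ((FS (cs.drop j)).length - (FS (cs.drop j)).count '#')) →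
    bLoop cs j out last = J cs := by
  intro j
  induction j with
  | zero => intro out last _ hout _; simp [bLoop, hout, List.drop_zero]
  | succ j ih =>
    intro out last hlen hout hlast
    have hj : j < cs.length := by omega
    have hdrop : cs.drop j = cs[j] :: cs.drop (j+1) := by
      rw [List.drop_eq_getElem_cons hj]
    have hget : cs.getD j ' ' = cs[j] := List.getD_eq_getElem cs ' ' hj
    have hk := count_le_len (FS (cs.drop (j+1)))
    have hout' : out = List.replicate j '.' ++ ('.' :: J (cs.drop (j+1))) := by
      rw [hout, List.replicate_succ']
      simp
    have hmerge : List.replicate j '.' ++ ('.' :: J (cs.drop (j+1))) =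
        List.replicate (j+1) '.' ++ J (cs.drop (j+1)) := by
      rw [List.replicate_succ']; simp
    rw [bLoop]
    simp only [hget]
    by_cases hc : cs[j] = '*'
    · rw [if_pos hc]
      apply ih _ _ (by omega)
      · rw [hout', hmerge, set_repl, hdrop, hc, J_star]
      · intro h1
        rw [hdrop, hc, FS_star]
        simp
        omega
    · by_cases hc2 : cs[j] = '#'
      · rw [if_neg hc, if_pos hc2]
        have hlast' : last = j + ((FS (cs.drop (j+1))).length - (FS (cs.drop (j+1))).count '#') := by
          have := hlast (by omega)
          omega
        apply ih _ _ (by omega)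
        · rw [hout', hlast', set_shift, hdrop, hc2, J_box]
        · intro h1
          rw [hdrop, hc2, FS_cons '#' _ (by decide)]
          simp
          omega
      · rw [if_neg hc, if_neg hc2]
        apply ih _ _ (by omega)
        · rw [hout', hdrop, J_dot cs[j] _ hc hc2]
        · intro h1
          have h2 := hlast (by omega)
          rw [hdrop, FS_cons _ _ hc]
          have hb : (cs[j] == '#') = false := by simp [hc2]
          simp [List.count_cons, hb]
          omega

theorem bLoop_eq_J (cs : List Char) :
    bLoop cs cs.length (List.replicate cs.length '.') (cs.length - 1) = J cs := by
  apply bLoop_inv cs cs.length _ _ le_rfl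
  · simp [J_nil]
  · intro h1
    simp [FS]
    omega

theorem rowA_eq_rowB (r : List String) : rowA r = rowB r := by
  simp [rowA, rowB, gravA_eq_J, bLoop_eq_J]

-- ===== VERDICT (by name: the statement is the Claim_ definition above) =====
theorem solve_spec : Claim_equal_solve := by
  intro matrix _
  unfold Spec_solve solve solve_alt
  rw [List.map_congr_left (fun r _ => rowA_eq_rowB r)]
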